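-- pv_equiv track=rewrite | github.com/CoekCx/CodeSnippetGenerator | generator-service/src/core/token_combiners.py | combine_comment_tokens
-- ===== SOURCE A (Python) =====
-- def combine_comment_tokens(code_tokens):
--     """Combine tokens that are part of a comment starting with // and continuing until the next newline token."""
--     combined_tokens = []
--     in_comment = False
--     current_comment = ""
--
--     for token in code_tokens:
--         if token == "/" and not in_comment:
--             # Start of a comment
--             in_comment = True
--             current_comment += token
--         elif token == "/" and in_comment:
--             # Second part of the comment start
--             current_comment += token
--         elif token == "\n":
--             if in_comment:
--                 # End of the comment
--                 current_comment += token
--                 combined_tokens.append(current_comment)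
--                 current_comment = ""
--                 in_comment = False
--             else:
--                 combined_tokens.append(token)
--         elif in_comment:
--             current_comment += token
--         else:
--             if in_comment:
--                 # If we are ending the comment, add the current comment
--                 combined_tokens.append(current_comment)
--                 current_comment = ""
--                 in_comment = False
--             combined_tokens.append(token)
--
--     # Append any remaining comment if the list ended without a newline
--     if in_comment:
--         combined_tokens.append(current_comment)
--
--     return combined_tokens
-- ===== SOURCE B (Python) =====
-- def combine_comment_tokens(code_tokens):
--     """Combine tokens that are part of a comment starting with // and continuing until the next newline token."""
--     combined_tokens = []
--     it = iter(code_tokens)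
--     for token in it:
--         if token == "/":
--             comment = token
--             for t in it:
--                 comment += t
--                 if t == "\n":
--                     break
--             combined_tokens.append(comment)
--         else:
--             combined_tokens.append(token)
--     return combined_tokens
-- ===== Notes on version B (the rewrite author's own statement) =====
-- stated objective: simpler
-- what changed: Replaces A's in_comment/current_comment state machine with a nested inner loop on a shared iterator that consumes and concatenates the comment tokens up to and including the newline, removing the flag and cross-iteration accumulator.
import Mathlib
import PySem

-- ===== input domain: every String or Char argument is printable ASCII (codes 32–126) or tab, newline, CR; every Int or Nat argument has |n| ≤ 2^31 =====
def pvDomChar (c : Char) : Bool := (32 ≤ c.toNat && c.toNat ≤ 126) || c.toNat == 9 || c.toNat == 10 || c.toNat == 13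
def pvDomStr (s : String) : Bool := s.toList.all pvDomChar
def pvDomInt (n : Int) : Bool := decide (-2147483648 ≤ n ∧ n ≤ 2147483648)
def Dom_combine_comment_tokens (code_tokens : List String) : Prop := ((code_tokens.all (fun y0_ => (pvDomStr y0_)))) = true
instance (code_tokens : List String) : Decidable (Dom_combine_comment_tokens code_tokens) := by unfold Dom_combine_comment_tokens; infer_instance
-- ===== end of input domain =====

-- B replaces A's in_comment/current_comment state machine with a nested inner loop on a
-- shared token stream that consumes the comment up to and including the newline (simpler).

-- ===== PORT A =====
-- state = (combined_tokens, in_comment, current_comment); one step per token, branches in A's order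
def combineStepA (st : List String × Bool × String) (token : String) : List String × Bool × String :=
  let (combined, inC, cur) := st
  if token = "/" ∧ inC = false then (combined, true, cur ++ token)
  else if token = "/" ∧ inC = true then (combined, true, cur ++ token)
  else if token = "\n" then
    if inC then (combined ++ [cur ++ token], false, "")
    else (combined ++ [token], false, cur)
  else if inC then (combined, true, cur ++ token)
  else
    -- Python's final else: in_comment is false here, its inner 'if in_comment' never fires
    (combined ++ [token], false, cur)

def combine_comment_tokens (code_tokens : List String) : List String :=
  let (combined, inC, cur) := code_tokens.foldl combineStepA ([], false, "")
  if inC then combined ++ [cur] else combined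

-- ===== PORT B =====
-- inner 'for t in it': extend comment until (and including) a newline; returns (comment, rest of stream)
def takeCommentB (comment : String) : List String → String × List String
  | [] => (comment, [])
  | t :: rest => if t = "\n" then (comment ++ t, rest) else takeCommentB (comment ++ t) rest

theorem takeCommentB_len (comment : String) (ts : List String) :
    (takeCommentB comment ts).2.length ≤ ts.length := by
  induction ts generalizing comment with
  | nil => simp [takeCommentB]
  | cons t rest ih =>
    simp only [takeCommentB]
    split
    · simp
    · exact le_trans (ih _) (Nat.le_succ _)

def combine_comment_tokens_alt (code_tokens : List String) : List String :=
  match code_tokens with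
  | [] => []
  | token :: rest =>
    if token = "/" then
      let p := takeCommentB token rest
      p.1 :: combine_comment_tokens_alt p.2
    else token :: combine_comment_tokens_alt rest
termination_by code_tokens.length
decreasing_by
  exact Nat.lt_succ_of_le (takeCommentB_len _ _)
  exact Nat.lt_succ_self _

-- ===== PRECONDITION & SPEC =====
def Spec_combine_comment_tokens (code_tokens : List String) (out : List String) : Prop := out = combine_comment_tokens_alt code_tokens
instance (code_tokens : List String) (out : List String) : Decidable (Spec_combine_comment_tokens code_tokens out) := by unfold Spec_combine_comment_tokens; infer_instance

-- ===== CLAIM (what is proved, stated in full; the proofs are below) =====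
def Claim_equal_combine_comment_tokens : Prop := ∀ (code_tokens : List String), Dom_combine_comment_tokens code_tokens → Spec_combine_comment_tokens code_tokens (combine_comment_tokens code_tokens)

-- ===== LEMMAS AND PROOFS =====

-- finish applies A's trailing 'if in_comment' flush to a loop state
def finishA (st : List String × Bool × String) : List String :=
  let (combined, inC, cur) := st
  if inC then combined ++ [cur] else combined

-- joint loop invariant: out of a comment, A's remaining loop produces acc ++ B's output;
-- inside a comment with accumulator c, it produces acc ++ (closed comment :: B's output on the rest)
theorem loop_invariant (ts : List String) :
    (∀ acc : List String, finishA (ts.foldl combineStepA (acc, false, "")) = acc ++ combine_comment_tokens_alt ts) ∧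
    (∀ (acc : List String) (c : String),
      finishA (ts.foldl combineStepA (acc, true, c)) =
        acc ++ ((takeCommentB c ts).1 :: combine_comment_tokens_alt (takeCommentB c ts).2)) := by
  induction ts with
  | nil =>
    constructor
    · intro acc; simp [finishA, combine_comment_tokens_alt]
    · intro acc c; simp [finishA, takeCommentB, combine_comment_tokens_alt]
  | cons t rest ih =>
    constructor
    · intro acc
      by_cases hsl : t = "/"
      · subst hsl
        simp [combineStepA, combine_comment_tokens_alt, ih.2]
      · by_cases hn : t = "\n"
        · subst hn
          simp [combineStepA, combine_comment_tokens_alt, ih.1, hsl]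
        · simp [combineStepA, combine_comment_tokens_alt, ih.1, hsl, hn]
    · intro acc c
      by_cases hsl : t = "/"
      · subst hsl
        simp [combineStepA, takeCommentB, ih.2]
      · by_cases hn : t = "\n"
        · subst hn
          simp [combineStepA, takeCommentB, ih.1, hsl]
        · simp [combineStepA, takeCommentB, ih.2, hsl, hn]

-- ===== VERDICT (by name: the statement is the Claim_ definition above) =====
theorem combine_comment_tokens_spec : Claim_equal_combine_comment_tokens := by
  intro code_tokens _
  show combine_comment_tokens code_tokens = combine_comment_tokens_alt code_tokens
  have h := (loop_invariant code_tokens).1 []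
  simpa [combine_comment_tokens, finishA] using h
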